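-- pv_equiv track=rewrite | github.com/FranRovi/Algorithms | HackerRank/Easy/marsExploration.py | marsExploration
-- ===== SOURCE A (Python) =====
-- def marsExploration(s):
--     counter = 0
--     for i in range(0,(len(s) - 2), 3):
--         if s[i] != 'S':
--             counter += 1
--         if s[i + 1] != 'O':
--             counter += 1
--         if s[i + 2] != 'S':
--             counter += 1
--     return counter
-- ===== SOURCE B (Python) =====
-- def marsExploration(s):
--     pattern = "SOS" * (len(s) // 3)
--     return sum(1 for a, b in zip(s, pattern) if a != b)
-- ===== Notes on version B (the rewrite author's own statement) =====
-- stated objective: simpler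
-- what changed: Replaces the stride-3 index loop with three per-group positional checks by materializing the expected repeated three-letter target string and counting pairwise mismatches in one zip pass.
import Mathlib
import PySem

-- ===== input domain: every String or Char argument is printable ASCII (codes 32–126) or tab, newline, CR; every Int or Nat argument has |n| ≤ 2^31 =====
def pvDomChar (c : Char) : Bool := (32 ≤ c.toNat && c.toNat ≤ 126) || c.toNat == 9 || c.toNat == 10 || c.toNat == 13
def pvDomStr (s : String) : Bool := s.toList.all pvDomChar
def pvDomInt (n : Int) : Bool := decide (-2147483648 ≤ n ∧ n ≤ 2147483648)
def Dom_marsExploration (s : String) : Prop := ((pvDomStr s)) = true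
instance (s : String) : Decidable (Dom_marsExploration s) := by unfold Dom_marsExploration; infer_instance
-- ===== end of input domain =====

-- B materializes the expected repeated three-letter target and counts pairwise mismatches in one zip pass (simpler decomposition; same cost).

-- ===== PORT A =====
def marsExploration (s : String) : Int :=
  (PySem.List.pyRange 0 (PySem.Str.len s - 2) 3).foldl
    (fun counter i =>
      let c1 := if PySem.Str.pyGet? s i ≠ some 'S' then counter + 1 else counter
      let c2 := if PySem.Str.pyGet? s (i + 1) ≠ some 'O' then c1 + 1 else c1
      if PySem.Str.pyGet? s (i + 2) ≠ some 'S' then c2 + 1 else c2) 0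

-- ===== PORT B =====
def marsExploration_alt (s : String) : Int :=
  let pattern := (List.replicate (s.toList.length / 3) ['S', 'O', 'S']).flatten
  ((s.toList.zip pattern).countP (fun p => p.1 ≠ p.2) : Int)

-- ===== PRECONDITION & SPEC =====
def Spec_marsExploration (s : String) (out : Int) : Prop := out = marsExploration_alt s
instance (s : String) (out : Int) : Decidable (Spec_marsExploration s out) := by unfold Spec_marsExploration; infer_instance

-- ===== CLAIM (what is proved, stated in full; the proofs are below) =====
def Claim_equal_marsExploration : Prop := ∀ (s : String), Dom_marsExploration s → Spec_marsExploration s (marsExploration s)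

-- ===== LEMMAS AND PROOFS =====

-- per-group mismatch count of A, group index j (absolute string index 3*j)
def pvG (l : List Char) (j : Nat) : Int :=
  (if PySem.List.pyGet? l (3 * (j : Int)) ≠ some 'S' then 1 else 0)
  + (if PySem.List.pyGet? l (3 * (j : Int) + 1) ≠ some 'O' then 1 else 0)
  + (if PySem.List.pyGet? l (3 * (j : Int) + 2) ≠ some 'S' then 1 else 0)

lemma pvGet_cons3 (a b c : Char) (t : List Char) (m : Nat) :
    PySem.List.pyGet? (a :: b :: c :: t) ((m : Int) + 3) = PySem.List.pyGet? t m := by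
  have h1 : ((m : Int) + 3) = ((m + 2 : Nat) : Int) + 1 := by push_cast; ring
  rw [h1, PySem.List.pyGet?_cons_succ]
  have h2 : ((m + 2 : Nat) : Int) = ((m + 1 : Nat) : Int) + 1 := by push_cast; ring
  rw [h2, PySem.List.pyGet?_cons_succ]
  have h3 : ((m + 1 : Nat) : Int) = (m : Int) + 1 := by push_cast; ring
  rw [h3, PySem.List.pyGet?_cons_succ]

lemma pvG_shift (a b c : Char) (t : List Char) (j : Nat) :
    pvG (a :: b :: c :: t) (j + 1) = pvG t j := by
  unfold pvG
  have e0 : (3 * ((j + 1 : Nat) : Int)) = ((3 * j : Nat) : Int) + 3 := by push_cast; ring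
  have e1 : (3 * ((j + 1 : Nat) : Int) + 1) = ((3 * j + 1 : Nat) : Int) + 3 := by push_cast; ring
  have e2 : (3 * ((j + 1 : Nat) : Int) + 2) = ((3 * j + 2 : Nat) : Int) + 3 := by push_cast; ring
  rw [e2, e1, e0, pvGet_cons3, pvGet_cons3, pvGet_cons3]
  have f0 : ((3 * j : Nat) : Int) = 3 * (j : Int) := by push_cast; ring
  have f1 : ((3 * j + 1 : Nat) : Int) = 3 * (j : Int) + 1 := by push_cast; ring
  have f2 : ((3 * j + 2 : Nat) : Int) = 3 * (j : Int) + 2 := by push_cast; ring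
  rw [f0, f1, f2]

lemma pvRange_eq (n : Nat) :
    PySem.List.pyRange 0 ((n : Int) - 2) 3 = List.map (fun k : Nat => ((3 : Int) * (k : Int))) (List.range (n / 3)) := by
  rw [PySem.List.pyRange_of_pos _ _ (by norm_num : (0:Int) < 3)]
  have hc : (if (0 : Int) < (n : Int) - 2 then (((n : Int) - 2 - 0 + 3 - 1) / 3).toNat else 0) = n / 3 := by
    split_ifs with h <;> omega
  rw [hc]
  simp only [zero_add]

lemma pvMain : ∀ (n : Nat) (l : List Char), l.length ≤ n →
    ((List.range (l.length / 3)).map (pvG l)).sum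
      = ((l.zip ((List.replicate (l.length / 3) ['S', 'O', 'S']).flatten)).countP
          (fun p => p.1 ≠ p.2) : Int) := by
  intro n
  induction n with
  | zero =>
    intro l hl
    have : l = [] := List.eq_nil_of_length_eq_zero (by omega)
    subst this; simp
  | succ n ih =>
    intro l hl
    match l with
    | [] => simp
    | [a] => simp
    | [a, b] => simp
    | a :: b :: c :: t =>
      have hk : (a :: b :: c :: t).length / 3 = t.length / 3 + 1 := by
        simp only [List.length_cons]; omega
      rw [hk, List.range_succ_eq_map, List.replicate_succ]
      have hmap : (List.map (pvG (a :: b :: c :: t)) (List.map (· + 1) (List.range (t.length / 3))))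
          = List.map (pvG t) (List.range (t.length / 3)) := by
        rw [List.map_map]
        exact List.map_congr_left (fun j _ => pvG_shift a b c t j)
      have hG0 : pvG (a :: b :: c :: t) 0
          = (if a ≠ 'S' then 1 else 0) + (if b ≠ 'O' then 1 else 0) + (if c ≠ 'S' then 1 else 0) := by
        have g0 : PySem.List.pyGet? (a :: b :: c :: t) (3 * ((0 : Nat) : Int)) = some a := by
          simp [PySem.List.pyGet?, PySem.List.pyIdx?]; rw [if_pos (by omega)]; simp
        have g1 : PySem.List.pyGet? (a :: b :: c :: t) (3 * ((0 : Nat) : Int) + 1) = some b := by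
          simp [PySem.List.pyGet?, PySem.List.pyIdx?]; rw [if_pos (by omega)]; simp
        have g2 : PySem.List.pyGet? (a :: b :: c :: t) (3 * ((0 : Nat) : Int) + 2) = some c := by
          simp [PySem.List.pyGet?, PySem.List.pyIdx?]; rw [if_pos (by omega)]; simp
        unfold pvG
        rw [g0, g1, g2]
        simp
      have iht := ih t (by simp only [List.length_cons] at hl; omega)
      simp only [List.map_cons, List.sum_cons, hmap, hG0, List.flatten_cons, List.cons_append,
        List.nil_append, List.zip_cons_cons, List.countP_cons, iht]
      push_cast
      by_cases ha : a = 'S' <;> by_cases hb : b = 'O' <;> by_cases hc : c = 'S' <;>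
        simp [ha, hb, hc] <;> ring

lemma pvFoldStr (s : String) (xs : List Nat) (acc : Int) :
    List.foldl
      (fun counter i =>
        let c1 := if PySem.Str.pyGet? s i ≠ some 'S' then counter + 1 else counter
        let c2 := if PySem.Str.pyGet? s (i + 1) ≠ some 'O' then c1 + 1 else c1
        if PySem.Str.pyGet? s (i + 2) ≠ some 'S' then c2 + 1 else c2) acc
      (List.map (fun k : Nat => ((3 : Int) * (k : Int))) xs)
    = acc + (xs.map (pvG s.toList)).sum := by
  induction xs generalizing acc with
  | nil => simp
  | cons j xs ih =>
    simp only [List.map_cons, List.foldl_cons, List.sum_cons]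
    rw [ih]
    have hget : ∀ i, PySem.Str.pyGet? s i = PySem.List.pyGet? s.toList i := by
      intro i; simp [PySem.Str.pyGet?]
    simp only [hget]
    unfold pvG

    split_ifs <;> ring

-- ===== VERDICT (by name: the statement is the Claim_ definition above) =====
theorem marsExploration_spec : Claim_equal_marsExploration := by
  intro s _
  unfold Spec_marsExploration marsExploration marsExploration_alt
  rw [show PySem.Str.len s = ((s.toList.length : Nat) : Int) from by simp [PySem.Str.len_eq]]
  rw [pvRange_eq, pvFoldStr, pvMain s.toList.length s.toList le_rfl]
  simp
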